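-- pv_equiv track=rewrite | github.com/oxfordmmm/masquerade | src/masquerade/expand_mask.py | enclose_mask
-- ===== SOURCE A (Python) =====
-- def enclose_mask(mask: set[int], amount: int) -> set[int]:
--     """Any gaps in the mask of size <=amount will be filled in."""
--     expanded_mask = mask.copy()
--     sorted_mask = sorted(mask)
--
--     for i in range(len(sorted_mask) - 1):
--         start = sorted_mask[i]
--         end = sorted_mask[i + 1]
--
--         if 0 < end - start - 1 <= amount:
--             expanded_mask.update(range(start + 1, end))
--
--     return expanded_mask
-- ===== SOURCE B (Python) =====
-- def enclose_mask(mask: set[int], amount: int) -> set[int]: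
--     """Any gaps in the mask of size <=amount will be filled in."""
--     expanded_mask = set(mask)
--     # partition the sorted elements into maximal runs whose successive
--     # differences are <= amount + 1, then fill each run's whole span at once
--     runs = []
--     first = last = None
--     for v in sorted(mask):
--         if last is not None and v - last <= amount + 1:
--             last = v
--         else:
--             if last is not None:
--                 runs.append((first, last))
--             first = last = v
--     if last is not None:
--         runs.append((first, last))
--     for first, last in runs:
--         expanded_mask.update(range(first, last + 1))
--     return expanded_mask
-- ===== Notes on version B (the rewrite author's own statement) =====
-- stated objective: alternative
-- what changed: B partitions the sorted elements into maximal runs whose successive differences are at most amount+1 and fills each run's whole span with one range update, instead of A's per-adjacent-pair gap test and per-gap update.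
import Mathlib
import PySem

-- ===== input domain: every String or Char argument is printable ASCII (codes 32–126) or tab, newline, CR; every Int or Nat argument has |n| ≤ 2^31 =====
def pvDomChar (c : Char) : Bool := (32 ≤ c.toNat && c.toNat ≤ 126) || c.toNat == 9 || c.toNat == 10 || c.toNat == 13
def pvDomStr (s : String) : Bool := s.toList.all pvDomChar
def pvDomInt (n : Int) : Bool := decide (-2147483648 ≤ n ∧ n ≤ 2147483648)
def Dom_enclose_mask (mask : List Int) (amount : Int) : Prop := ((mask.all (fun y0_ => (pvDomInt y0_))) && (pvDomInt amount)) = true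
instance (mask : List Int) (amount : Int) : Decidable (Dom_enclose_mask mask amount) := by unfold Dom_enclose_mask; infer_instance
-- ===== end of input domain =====

-- B fills gaps by partitioning the sorted elements into maximal runs (successive difference
-- ≤ amount+1) and updating with each run's whole span at once, instead of A's per-adjacent-pair
-- gap test over indices; objective: alternative (same O(n log n) sort-dominated cost).


-- ===== PORT A =====
-- literal transliteration of Source A: sort, then for i in range(len-1) test each adjacent gap
def enclose_mask (mask : List Int) (amount : Int) : List Int :=
  let expanded := mask
  let s := PySem.List.sorted mask (fun x => x) false
  (PySem.List.pyRange 0 ((s.length : Int) - 1) 1).foldl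
    (fun exp i =>
      let start := PySem.List.pyGetD s i 0
      let e := PySem.List.pyGetD s (i + 1) 0
      if 0 < e - start - 1 ∧ e - start - 1 ≤ amount then
        PySem.Set.update exp (PySem.List.pyRange (start + 1) e 1)
      else exp)
    expanded

-- ===== PORT B =====
-- Source B's run accumulator loop (first/last with a flush on break and at the end) as the
-- obvious structural recursion over the sorted list
def pvRunsAux (amount first last : Int) : List Int → List (Int × Int)
  | [] => [(first, last)]
  | v :: rest =>
      if v - last ≤ amount + 1 then pvRunsAux amount first v rest
      else (first, last) :: pvRunsAux amount v v rest

def pvRuns (amount : Int) : List Int → List (Int × Int)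
  | [] => []
  | v :: rest => pvRunsAux amount v v rest

def enclose_mask_alt (mask : List Int) (amount : Int) : List Int :=
  (pvRuns amount (PySem.List.sorted mask (fun x => x) false)).foldl
    (fun exp p => PySem.Set.update exp (PySem.List.pyRange p.1 (p.2 + 1) 1)) mask

-- ===== PRECONDITION & SPEC =====
def Spec_enclose_mask (mask : List Int) (amount : Int) (out : List Int) : Prop := out = enclose_mask_alt mask amount
instance (mask : List Int) (amount : Int) (out : List Int) : Decidable (Spec_enclose_mask mask amount out) := by unfold Spec_enclose_mask; infer_instance

-- ===== CLAIM (what is proved, stated in full; the proofs are below) =====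
def Claim_equal_enclose_mask : Prop := ∀ (mask : List Int) (amount : Int), Dom_enclose_mask mask amount → Spec_enclose_mask mask amount (enclose_mask mask amount)

-- ===== LEMMAS AND PROOFS =====

-- A's per-pair action, named for the proofs
def pvAstep (amount : Int) (exp : List Int) (a b : Int) : List Int :=
  if 0 < b - a - 1 ∧ b - a - 1 ≤ amount then
    PySem.Set.update exp (PySem.List.pyRange (a + 1) b 1)
  else exp

lemma pv_update_of_subset {s : List Int} : ∀ {l : List Int}, (∀ x ∈ l, x ∈ s) → PySem.Set.update s l = s := by
  intro l
  induction l with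
  | nil => intro _; exact PySem.Set.update_nil s
  | cons x l ih =>
      intro h
      rw [PySem.Set.update_cons, PySem.Set.add_of_mem (h x (by simp))]
      exact ih (fun y hy => h y (by simp [hy]))

lemma pv_mem_update_left {s : List Int} {l : List Int} {a : Int} (h : a ∈ s) :
    a ∈ PySem.Set.update s l := (PySem.Set.mem_update s l a).mpr (Or.inl h)

-- index loop over range(len-1) with s[i], s[i+1] = fold over adjacent pairs
lemma pv_foldl_range_pairs {β : Type} (f : β → Int → Int → β) :
    ∀ (s : List Int) (init : β),
      (List.range (s.length - 1)).foldl
        (fun e k => f e (s.getD k 0) (s.getD (k + 1) 0)) init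
      = (s.zip s.tail).foldl (fun e p => f e p.1 p.2) init := by
  intro s
  induction s with
  | nil => intro init; rfl
  | cons a s ih =>
      cases s with
      | nil => intro init; rfl
      | cons b t =>
          intro init
          have hlen : (a :: b :: t).length - 1 = t.length + 1 := by simp
          rw [hlen, List.range_succ_eq_map]
          simp only [List.foldl_cons, List.foldl_map, List.getD_cons_zero, List.getD_cons_succ]
          exact ih (f init a b)

-- A's index loop over an arbitrary list equals the pvAstep fold over adjacent pairs
lemma pv_A_fold (amount : Int) (s : List Int) (init : List Int) :
    (PySem.List.pyRange 0 ((s.length : Int) - 1) 1).foldl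
      (fun exp i =>
        let start := PySem.List.pyGetD s i 0
        let e := PySem.List.pyGetD s (i + 1) 0
        if 0 < e - start - 1 ∧ e - start - 1 ≤ amount then
          PySem.Set.update exp (PySem.List.pyRange (start + 1) e 1)
        else exp)
      init
    = (s.zip s.tail).foldl (fun e p => pvAstep amount e p.1 p.2) init := by
  cases s with
  | nil =>
      rw [PySem.List.pyRange_one_eq_nil (by norm_num)]
      rfl
  | cons a t =>
      have h1 : ((a :: t).length : Int) - 1 = ((t.length : Nat) : Int) := by
        simp
      rw [h1, PySem.List.pyRange_zero_nat, List.foldl_map]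
      have hfun : (fun (e : List Int) (k : Nat) =>
            (let start := PySem.List.pyGetD (a :: t) ((k : Nat) : Int) 0
             let en := PySem.List.pyGetD (a :: t) (((k : Nat) : Int) + 1) 0
             if 0 < en - start - 1 ∧ en - start - 1 ≤ amount then
               PySem.Set.update e (PySem.List.pyRange (start + 1) en 1)
             else e))
          = fun e k => pvAstep amount e ((a :: t).getD k 0) ((a :: t).getD (k + 1) 0) := by
        funext e k
        have hk1 : (((k : Nat) : Int) + 1) = (((k + 1 : Nat) : Nat) : Int) := by push_cast; ring
        simp only [hk1, PySem.List.pyGetD_natCast, pvAstep]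
      rw [hfun]
      have hlen : t.length = (a :: t).length - 1 := by simp
      rw [hlen]
      exact pv_foldl_range_pairs (fun e x y => pvAstep amount e x y) (a :: t) init

-- run-emission fold (B) vs pair fold (A), with the invariant that A's accumulator is
-- B's accumulator updated with the span of the currently open run
lemma pv_aux (amount : Int) :
    ∀ (rest : List Int) (first last : Int) (expB expA : List Int),
      (last :: rest).Pairwise (· ≤ ·) →
      (∀ a ∈ last :: rest, a ∈ expB) →
      first ≤ last →
      PySem.Set.update expB (PySem.List.pyRange first (last + 1) 1) = expA →
      (pvRunsAux amount first last rest).foldl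
          (fun e p => PySem.Set.update e (PySem.List.pyRange p.1 (p.2 + 1) 1)) expB
        = ((last :: rest).zip rest).foldl (fun e p => pvAstep amount e p.1 p.2) expA := by
  intro rest
  induction rest with
  | nil =>
      intro first last expB expA _ _ _ hinv
      simpa [pvRunsAux] using hinv
  | cons v t ih =>
      intro first last expB expA hpw hmem hfl hinv
      have hlastv : last ≤ v := (List.pairwise_cons.mp hpw).1 v (by simp)
      have hvB : v ∈ expB := hmem v (by simp)
      have hvA : v ∈ expA := by rw [← hinv]; exact pv_mem_update_left hvB
      have hpw' : (v :: t).Pairwise (· ≤ ·) := (List.pairwise_cons.mp hpw).2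
      by_cases hrun : v - last ≤ amount + 1
      · -- run continues: B emits nothing yet, A fills the gap (last, v)
        have hsplit : PySem.Set.update expB (PySem.List.pyRange first (v + 1) 1)
            = PySem.Set.update expA (PySem.List.pyRange (last + 1) (v + 1) 1) := by
          rw [PySem.List.pyRange_one_append first (last + 1) (v + 1) (by omega) (by omega),
              PySem.Set.update_append, hinv]
        have hinv' : PySem.Set.update expB (PySem.List.pyRange first (v + 1) 1)
            = pvAstep amount expA last v := by
          rw [hsplit]
          by_cases hc : 0 < v - last - 1 ∧ v - last - 1 ≤ amount
          · have hA' : pvAstep amount expA last v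
                = PySem.Set.update expA (PySem.List.pyRange (last + 1) v 1) := by
              unfold pvAstep; rw [if_pos hc]
            rw [hA', PySem.List.pyRange_one_append (last + 1) v (v + 1) (by omega) (by omega),
                PySem.Set.update_append, PySem.List.pyRange_one_singleton]
            apply pv_update_of_subset
            intro x hx
            rw [List.mem_singleton] at hx
            subst hx
            exact pv_mem_update_left hvA
          · have hA' : pvAstep amount expA last v = expA := by
              unfold pvAstep; rw [if_neg hc]
            rw [hA']
            apply pv_update_of_subset
            intro x hx
            rw [PySem.List.mem_pyRange_one] at hx
            have hxv : x = v := by omega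
            subst hxv
            exact hvA
        have hrec := ih first v expB (pvAstep amount expA last v) hpw'
          (fun a ha => hmem a (by simp at ha ⊢; tauto)) (by omega) hinv'
        calc (pvRunsAux amount first last (v :: t)).foldl
              (fun e p => PySem.Set.update e (PySem.List.pyRange p.1 (p.2 + 1) 1)) expB
            = (pvRunsAux amount first v t).foldl
              (fun e p => PySem.Set.update e (PySem.List.pyRange p.1 (p.2 + 1) 1)) expB := by
              rw [pvRunsAux, if_pos hrun]
          _ = ((v :: t).zip t).foldl (fun e p => pvAstep amount e p.1 p.2)
                (pvAstep amount expA last v) := hrec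
          _ = ((last :: v :: t).zip (v :: t)).foldl (fun e p => pvAstep amount e p.1 p.2) expA := by
              rw [List.zip_cons_cons, List.foldl_cons]
      · -- gap too large: B closes the run (emits [first..last]), A skips the pair
        have hAskip : pvAstep amount expA last v = expA := by
          unfold pvAstep; rw [if_neg (by omega)]
        have hsingle : PySem.Set.update expA (PySem.List.pyRange v (v + 1) 1) = expA := by
          rw [PySem.List.pyRange_one_singleton]
          apply pv_update_of_subset
          intro x hx
          rw [List.mem_singleton] at hx
          subst hx
          exact hvA
        have hrec := ih v v expA expA hpw'
          (fun a ha => by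
            rw [← hinv]
            exact pv_mem_update_left (hmem a (by simp at ha ⊢; tauto)))
          le_rfl hsingle
        calc (pvRunsAux amount first last (v :: t)).foldl
              (fun e p => PySem.Set.update e (PySem.List.pyRange p.1 (p.2 + 1) 1)) expB
            = (pvRunsAux amount v v t).foldl
              (fun e p => PySem.Set.update e (PySem.List.pyRange p.1 (p.2 + 1) 1))
              (PySem.Set.update expB (PySem.List.pyRange first (last + 1) 1)) := by
              rw [pvRunsAux, if_neg hrun]
              rfl
          _ = (pvRunsAux amount v v t).foldl
              (fun e p => PySem.Set.update e (PySem.List.pyRange p.1 (p.2 + 1) 1)) expA := by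
              rw [hinv]
          _ = ((v :: t).zip t).foldl (fun e p => pvAstep amount e p.1 p.2) expA := hrec
          _ = ((last :: v :: t).zip (v :: t)).foldl (fun e p => pvAstep amount e p.1 p.2) expA := by
              rw [List.zip_cons_cons, List.foldl_cons, hAskip]

-- ===== VERDICT (by name: the statement is the Claim_ definition above) =====
theorem enclose_mask_spec : Claim_equal_enclose_mask := by
  intro mask amount _
  unfold Spec_enclose_mask enclose_mask_alt
  have hA : enclose_mask mask amount =
      (((PySem.List.sorted mask (fun x => x) false).zip
          (PySem.List.sorted mask (fun x => x) false).tail).foldl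
        (fun e p => pvAstep amount e p.1 p.2) mask) := by
    unfold enclose_mask
    exact pv_A_fold amount (PySem.List.sorted mask (fun x => x) false) mask
  rw [hA]
  have hmem : ∀ a ∈ PySem.List.sorted mask (fun x => x) false, a ∈ mask := by
    intro a ha
    exact (PySem.List.sorted_perm mask (fun x => x) false).mem_iff.mp ha
  have hpw : (PySem.List.sorted mask (fun x => x) false).Pairwise (· ≤ ·) :=
    PySem.List.sorted_pairwise mask (fun x => x)
  generalize hn : PySem.List.sorted mask (fun x => x) false = s at hmem hpw ⊢
  cases s
  case nil => rfl
  case cons v t =>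
      have hsingle : PySem.Set.update mask (PySem.List.pyRange v (v + 1) 1) = mask := by
        rw [PySem.List.pyRange_one_singleton]
        apply pv_update_of_subset
        intro x hx
        rw [List.mem_singleton] at hx
        rw [hx]
        exact hmem v (by simp)
      exact (pv_aux amount t v v mask mask hpw hmem le_rfl hsingle).symm
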